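-- pv_equiv track=rewrite | github.com/ItsVinayProgrammer/NLP-Project | temp.py | explain_mistake
-- ===== SOURCE A (Python) =====
-- def explain_mistake(diff, difficulty):
--     """Explain grammar mistakes."""
--     if not diff:
--         return ["Your sentence is correct! Great job!"]
--
--     explanations = []
--     for error in diff:
--         orig = error["original"]
--         corr = error["corrected"]
--         if not orig and not corr:
--             continue
--
--         if difficulty == "beginner":
--             if orig.lower() == "i" and corr.lower() == "i":
--                 explanations.append(f"'{orig}' should be '{corr}'. Always capitalize 'I'.")
--             elif orig.lower() in ["its", "it's", "thats", "that's"] and corr.lower() in ["its", "it's", "thats", "that's"]: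
--                 explanations.append(f"'{orig}' should be '{corr}'. Use 'it's' or 'that's' for 'it is'/'that is', 'its'/'thats' for possession.")
--             elif orig.lower() in ["is", "are", "am"] and corr.lower() in ["is", "are", "am"]:
--                 explanations.append(f"'{orig}' should be '{corr}'. The verb must match the subject.")
--             elif orig.lower() in ["a", "an"] and corr.lower() in ["a", "an"]:
--                 explanations.append(f"'{orig}' should be '{corr}'. Use 'an' before vowels.")
--             elif not orig and corr:
--                 explanations.append(f"Add '{corr}' to your sentence.")
--             elif orig and not corr:
--                 explanations.append(f"You don’t need '{orig}'.")
--             else: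
--                 explanations.append(f"Change '{orig}' to '{corr}'.")
--         elif difficulty == "intermediate":
--             if orig.lower() == "i" and corr.lower() == "i":
--                 explanations.append(f"'{orig}' should be '{corr}'. Capitalize 'I'.")
--             elif orig.lower() in ["its", "it's", "thats", "that's"] and corr.lower() in ["its", "it's", "thats", "that's"]:
--                 explanations.append(f"'{orig}' should be '{corr}'. 'It's'/'That's' means 'it is'/'that is', 'its'/'thats' shows ownership.")
--             elif orig.lower() in ["is", "are", "am"] and corr.lower() in ["is", "are", "am"]:
--                 explanations.append(f"'{orig}' should be '{corr}'. Ensure verb agreement.")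
--             elif orig.lower() in ["a", "an"] and corr.lower() in ["a", "an"]:
--                 explanations.append(f"'{orig}' should be '{corr}'. Articles match sounds.")
--             elif not orig and corr:
--                 explanations.append(f"Add '{corr}' for correctness.")
--             elif orig and not corr:
--                 explanations.append(f"Remove '{orig}'.")
--             else:
--                 explanations.append(f"Use '{corr}' instead of '{orig}'.")
--         else:
--             if orig.lower() == "i" and corr.lower() == "i":
--                 explanations.append(f"'{orig}' should be '{corr}'. Pronoun 'I' needs capitalization.")
--             elif orig.lower() in ["its", "it's", "thats", "that's"] and corr.lower() in ["its", "it's", "thats", "that's"]: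
--                 explanations.append(f"'{orig}' should be '{corr}'. Use 'it's'/'that's' for contraction, 'its'/'thats' for possessive.")
--             elif orig.lower() in ["is", "are", "am"] and corr.lower() in ["is", "are", "am"]:
--                 explanations.append(f"'{orig}' should be '{corr}'. Subject-verb agreement issue.")
--             elif orig.lower() in ["a", "an"] and corr.lower() in ["a", "an"]:
--                 explanations.append(f"'{orig}' should be '{corr}'. Incorrect article.")
--             elif not orig and corr:
--                 explanations.append(f"Insert '{corr}' for structure.")
--             elif orig and not corr:
--                 explanations.append(f"'{orig}' is redundant.")
--             else:
--                 explanations.append(f"Replace '{orig}' with '{corr}'.")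
--
--     return explanations
-- ===== SOURCE B (Python) =====
-- # Token-table renderer: each word maps to a word-class id via one dict lookup;
-- # category = shared class id (or insert/delete/substitute); the message is
-- # assembled by joining a token sequence from a flat (category*3+level) table.
-- O, C = 0, 1  # placeholder tokens for the original / corrected word
--
-- WORD_CLASS = {"i": 0, "its": 1, "it's": 1, "thats": 1, "that's": 1,
--               "is": 2, "are": 2, "am": 2, "a": 3, "an": 3}
--
-- MSGS = [
--     # category 0: capitalization of 'I'
--     ("'", O, "' should be '", C, "'. Always capitalize 'I'."),
--     ("'", O, "' should be '", C, "'. Capitalize 'I'."),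
--     ("'", O, "' should be '", C, "'. Pronoun 'I' needs capitalization."),
--     # category 1: its/it's/thats/that's
--     ("'", O, "' should be '", C, "'. Use 'it's' or 'that's' for 'it is'/'that is', 'its'/'thats' for possession."),
--     ("'", O, "' should be '", C, "'. 'It's'/'That's' means 'it is'/'that is', 'its'/'thats' shows ownership."),
--     ("'", O, "' should be '", C, "'. Use 'it's'/'that's' for contraction, 'its'/'thats' for possessive."),
--     # category 2: subject-verb agreement
--     ("'", O, "' should be '", C, "'. The verb must match the subject."),
--     ("'", O, "' should be '", C, "'. Ensure verb agreement."),
--     ("'", O, "' should be '", C, "'. Subject-verb agreement issue."),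
--     # category 3: articles
--     ("'", O, "' should be '", C, "'. Use 'an' before vowels."),
--     ("'", O, "' should be '", C, "'. Articles match sounds."),
--     ("'", O, "' should be '", C, "'. Incorrect article."),
--     # category 4: insertion
--     ("Add '", C, "' to your sentence."),
--     ("Add '", C, "' for correctness."),
--     ("Insert '", C, "' for structure."),
--     # category 5: deletion
--     ("You don\u2019t need '", O, "'."),
--     ("Remove '", O, "'."),
--     ("'", O, "' is redundant."),
--     # category 6: substitution
--     ("Change '", O, "' to '", C, "'."),
--     ("Use '", C, "' instead of '", O, "'."),
--     ("Replace '", O, "' with '", C, "'."),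
-- ]
--
-- LEVEL = {"beginner": 0, "intermediate": 1}
--
--
-- def _category(orig, corr):
--     ko = WORD_CLASS.get(orig.lower())
--     kc = WORD_CLASS.get(corr.lower())
--     if ko is not None and ko == kc:
--         return ko
--     if not orig:
--         return 4
--     if not corr:
--         return 5
--     return 6
--
--
-- def explain_mistake(diff, difficulty):
--     """Explain grammar mistakes (word-class lookup + token-sequence table)."""
--     if not diff:
--         return ["Your sentence is correct! Great job!"]
--     level = LEVEL.get(difficulty, 2)
--     out = []
--     for e in diff:
--         o, c = e["original"], e["corrected"]
--         if o or c:
--             toks = MSGS[_category(o, c) * 3 + level]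
--             out.append("".join(o if t == 0 else c if t == 1 else t for t in toks))
--     return out
-- ===== Notes on version B (the rewrite author's own statement) =====
-- stated objective: alternative
-- what changed: Replaced A's three per-difficulty if/elif predicate cascades with a word-class dictionary (one lookup per word; equal classes give the category, so no ordered membership chain) and a flat token-sequence table indexed by category*3+level, rendered by joining tokens; no per-difficulty branching or f-string cascades remain.
import Mathlib
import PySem

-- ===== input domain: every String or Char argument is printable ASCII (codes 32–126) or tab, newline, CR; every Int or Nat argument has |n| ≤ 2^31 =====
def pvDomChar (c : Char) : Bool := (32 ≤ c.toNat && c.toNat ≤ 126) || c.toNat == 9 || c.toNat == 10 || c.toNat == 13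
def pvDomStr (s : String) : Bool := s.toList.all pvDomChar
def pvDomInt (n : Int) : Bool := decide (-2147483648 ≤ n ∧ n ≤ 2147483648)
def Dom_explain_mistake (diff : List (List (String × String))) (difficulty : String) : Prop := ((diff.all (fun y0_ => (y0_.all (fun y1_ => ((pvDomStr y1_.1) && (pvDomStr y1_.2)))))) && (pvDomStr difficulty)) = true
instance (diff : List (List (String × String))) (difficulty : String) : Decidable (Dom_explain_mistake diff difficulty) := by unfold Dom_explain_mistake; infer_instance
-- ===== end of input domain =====

-- B replaces A's three per-difficulty if/elif cascades by a word-class dictionary plus a flat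
-- token-sequence message table rendered by joining tokens (objective: alternative, same cost).
-- ===== PORT A =====
-- the for-loop with its `explanations` accumulator; the three per-difficulty cascades are inline, as in A
def explainA_loop (diff : List (List (String × String))) (difficulty : String)
    (acc : List String) : List String :=
  match diff with
  | [] => acc
  | e :: rest =>
    match (PySem.Dict.mk e).get? "original", (PySem.Dict.mk e).get? "corrected" with
    | some orig, some corr =>
      if orig = "" ∧ corr = "" then explainA_loop rest difficulty acc
      else
        explainA_loop rest difficulty (acc ++
          [if difficulty = "beginner" then
            (if PySem.Str.lower orig = "i" ∧ PySem.Str.lower corr = "i" then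
              "'" ++ orig ++ "' should be '" ++ corr ++ "'. Always capitalize 'I'."
            else if PySem.Str.lower orig ∈ (["its", "it's", "thats", "that's"] : List String) ∧ PySem.Str.lower corr ∈ (["its", "it's", "thats", "that's"] : List String) then
              "'" ++ orig ++ "' should be '" ++ corr ++ "'. Use 'it's' or 'that's' for 'it is'/'that is', 'its'/'thats' for possession."
            else if PySem.Str.lower orig ∈ (["is", "are", "am"] : List String) ∧ PySem.Str.lower corr ∈ (["is", "are", "am"] : List String) then
              "'" ++ orig ++ "' should be '" ++ corr ++ "'. The verb must match the subject."
            else if PySem.Str.lower orig ∈ (["a", "an"] : List String) ∧ PySem.Str.lower corr ∈ (["a", "an"] : List String) then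
              "'" ++ orig ++ "' should be '" ++ corr ++ "'. Use 'an' before vowels."
            else if orig = "" ∧ corr ≠ "" then
              "Add '" ++ corr ++ "' to your sentence."
            else if orig ≠ "" ∧ corr = "" then
              "You don’t need '" ++ orig ++ "'."
            else
              "Change '" ++ orig ++ "' to '" ++ corr ++ "'.")
          else if difficulty = "intermediate" then
            (if PySem.Str.lower orig = "i" ∧ PySem.Str.lower corr = "i" then
              "'" ++ orig ++ "' should be '" ++ corr ++ "'. Capitalize 'I'."
            else if PySem.Str.lower orig ∈ (["its", "it's", "thats", "that's"] : List String) ∧ PySem.Str.lower corr ∈ (["its", "it's", "thats", "that's"] : List String) then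
              "'" ++ orig ++ "' should be '" ++ corr ++ "'. 'It's'/'That's' means 'it is'/'that is', 'its'/'thats' shows ownership."
            else if PySem.Str.lower orig ∈ (["is", "are", "am"] : List String) ∧ PySem.Str.lower corr ∈ (["is", "are", "am"] : List String) then
              "'" ++ orig ++ "' should be '" ++ corr ++ "'. Ensure verb agreement."
            else if PySem.Str.lower orig ∈ (["a", "an"] : List String) ∧ PySem.Str.lower corr ∈ (["a", "an"] : List String) then
              "'" ++ orig ++ "' should be '" ++ corr ++ "'. Articles match sounds."
            else if orig = "" ∧ corr ≠ "" then
              "Add '" ++ corr ++ "' for correctness."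
            else if orig ≠ "" ∧ corr = "" then
              "Remove '" ++ orig ++ "'."
            else
              "Use '" ++ corr ++ "' instead of '" ++ orig ++ "'.")
          else
            (if PySem.Str.lower orig = "i" ∧ PySem.Str.lower corr = "i" then
              "'" ++ orig ++ "' should be '" ++ corr ++ "'. Pronoun 'I' needs capitalization."
            else if PySem.Str.lower orig ∈ (["its", "it's", "thats", "that's"] : List String) ∧ PySem.Str.lower corr ∈ (["its", "it's", "thats", "that's"] : List String) then
              "'" ++ orig ++ "' should be '" ++ corr ++ "'. Use 'it's'/'that's' for contraction, 'its'/'thats' for possessive."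
            else if PySem.Str.lower orig ∈ (["is", "are", "am"] : List String) ∧ PySem.Str.lower corr ∈ (["is", "are", "am"] : List String) then
              "'" ++ orig ++ "' should be '" ++ corr ++ "'. Subject-verb agreement issue."
            else if PySem.Str.lower orig ∈ (["a", "an"] : List String) ∧ PySem.Str.lower corr ∈ (["a", "an"] : List String) then
              "'" ++ orig ++ "' should be '" ++ corr ++ "'. Incorrect article."
            else if orig = "" ∧ corr ≠ "" then
              "Insert '" ++ corr ++ "' for structure."
            else if orig ≠ "" ∧ corr = "" then
              "'" ++ orig ++ "' is redundant."
            else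
              "Replace '" ++ orig ++ "' with '" ++ corr ++ "'.")])
    | _, _ => explainA_loop rest difficulty acc  -- KeyError in Python; excluded by Pre_

def explain_mistake (diff : List (List (String × String))) (difficulty : String) : List String :=
  if diff = [] then ["Your sentence is correct! Great job!"]
  else explainA_loop diff difficulty []

-- ===== PORT B =====
-- message tokens: the original word, the corrected word, or a literal piece (O, C, str in Source B)
inductive Tok
  | o : Tok
  | c : Tok
  | lit : String → Tok
deriving DecidableEq, Repr

-- WORD_CLASS: one dict mapping each special word to its word-class id
def wordClassB : PySem.Dict String Nat :=
  PySem.Dict.mk [("i", 0), ("its", 1), ("it's", 1), ("thats", 1), ("that's", 1),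
                 ("is", 2), ("are", 2), ("am", 2), ("a", 3), ("an", 3)]

-- MSGS: flat token-sequence table, index = category*3 + level
def msgsB : List (List Tok) :=
  [ [Tok.lit "'", Tok.o, Tok.lit "' should be '", Tok.c, Tok.lit "'. Always capitalize 'I'."],
    [Tok.lit "'", Tok.o, Tok.lit "' should be '", Tok.c, Tok.lit "'. Capitalize 'I'."],
    [Tok.lit "'", Tok.o, Tok.lit "' should be '", Tok.c, Tok.lit "'. Pronoun 'I' needs capitalization."],
    [Tok.lit "'", Tok.o, Tok.lit "' should be '", Tok.c, Tok.lit "'. Use 'it's' or 'that's' for 'it is'/'that is', 'its'/'thats' for possession."],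
    [Tok.lit "'", Tok.o, Tok.lit "' should be '", Tok.c, Tok.lit "'. 'It's'/'That's' means 'it is'/'that is', 'its'/'thats' shows ownership."],
    [Tok.lit "'", Tok.o, Tok.lit "' should be '", Tok.c, Tok.lit "'. Use 'it's'/'that's' for contraction, 'its'/'thats' for possessive."],
    [Tok.lit "'", Tok.o, Tok.lit "' should be '", Tok.c, Tok.lit "'. The verb must match the subject."],
    [Tok.lit "'", Tok.o, Tok.lit "' should be '", Tok.c, Tok.lit "'. Ensure verb agreement."],
    [Tok.lit "'", Tok.o, Tok.lit "' should be '", Tok.c, Tok.lit "'. Subject-verb agreement issue."],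
    [Tok.lit "'", Tok.o, Tok.lit "' should be '", Tok.c, Tok.lit "'. Use 'an' before vowels."],
    [Tok.lit "'", Tok.o, Tok.lit "' should be '", Tok.c, Tok.lit "'. Articles match sounds."],
    [Tok.lit "'", Tok.o, Tok.lit "' should be '", Tok.c, Tok.lit "'. Incorrect article."],
    [Tok.lit "Add '", Tok.c, Tok.lit "' to your sentence."],
    [Tok.lit "Add '", Tok.c, Tok.lit "' for correctness."],
    [Tok.lit "Insert '", Tok.c, Tok.lit "' for structure."],
    [Tok.lit "You don’t need '", Tok.o, Tok.lit "'."],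
    [Tok.lit "Remove '", Tok.o, Tok.lit "'."],
    [Tok.lit "'", Tok.o, Tok.lit "' is redundant."],
    [Tok.lit "Change '", Tok.o, Tok.lit "' to '", Tok.c, Tok.lit "'."],
    [Tok.lit "Use '", Tok.c, Tok.lit "' instead of '", Tok.o, Tok.lit "'."],
    [Tok.lit "Replace '", Tok.o, Tok.lit "' with '", Tok.c, Tok.lit "'."] ]

-- _category from Source B: word classes of the two (lowercased) words, else insert/delete/substitute
def categoryB (orig corr : String) : Nat :=
  match wordClassB.get? (PySem.Str.lower orig), wordClassB.get? (PySem.Str.lower corr) with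
  | some ko, some kc =>
    if ko = kc then ko
    else if orig = "" then 4 else if corr = "" then 5 else 6
  | _, _ => if orig = "" then 4 else if corr = "" then 5 else 6

-- LEVEL.get(difficulty, 2)
def levelB (difficulty : String) : Nat :=
  (PySem.Dict.mk [("beginner", 0), ("intermediate", 1)]).getD difficulty 2

-- ''.join(o if t == 0 else c if t == 1 else t for t in toks): structural concatenation
-- (exact: joining with the empty separator is plain concatenation of the rendered tokens)
def renderB (o c : String) : List Tok → String
  | [] => ""
  | Tok.o :: ts => o ++ renderB o c ts
  | Tok.c :: ts => c ++ renderB o c ts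
  | Tok.lit s :: ts => s ++ renderB o c ts

-- the loop body of Source B: out-accumulator with the same skip guard
def explainB_loop (diff : List (List (String × String))) (level : Nat)
    (acc : List String) : List String :=
  match diff with
  | [] => acc
  | e :: rest =>
    match (PySem.Dict.mk e).get? "original", (PySem.Dict.mk e).get? "corrected" with
    | some o, some c =>
      if o ≠ "" ∨ c ≠ "" then
        explainB_loop rest level
          (acc ++ [renderB o c (msgsB.getD (categoryB o c * 3 + level) [])])
      else explainB_loop rest level acc
    | _, _ => explainB_loop rest level acc  -- KeyError in Python; excluded by Pre_

def explain_mistake_alt (diff : List (List (String × String))) (difficulty : String) : List String :=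
  if diff = [] then ["Your sentence is correct! Great job!"]
  else explainB_loop diff (levelB difficulty) []

-- ===== PRECONDITION & SPEC =====
-- Pre_ excludes errors missing the "original" or "corrected" key, on which Python A raises KeyError.
def Pre_explain_mistake (diff : List (List (String × String))) (difficulty : String) : Prop :=
  diff.all (fun e => ((PySem.Dict.mk e).get? "original").isSome && ((PySem.Dict.mk e).get? "corrected").isSome) = true
instance (diff : List (List (String × String))) (difficulty : String) : Decidable (Pre_explain_mistake diff difficulty) := by unfold Pre_explain_mistake; infer_instance
def pvWitness_explain_mistake : (List (List (String × String))) × String :=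
  ([[("original", "i"), ("corrected", "I")]], "beginner")
def Spec_explain_mistake (diff : List (List (String × String))) (difficulty : String) (out : List String) : Prop := out = explain_mistake_alt diff difficulty
instance (diff : List (List (String × String))) (difficulty : String) (out : List String) : Decidable (Spec_explain_mistake diff difficulty out) := by unfold Spec_explain_mistake; infer_instance

-- ===== CLAIM (what is proved, stated in full; the proofs are below) =====
def Claim_equal_explain_mistake : Prop := ∀ (diff : List (List (String × String))) (difficulty : String), Dom_explain_mistake diff difficulty → Pre_explain_mistake diff difficulty → Spec_explain_mistake diff difficulty (explain_mistake diff difficulty)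

-- ===== LEMMAS AND PROOFS =====
-- characterization of the word-class dictionary on an arbitrary string
lemma wordClassB_spec (s : String) :
    wordClassB.get? s =
      (if s = "i" then some 0
       else if s ∈ (["its", "it's", "thats", "that's"] : List String) then some 1
       else if s ∈ (["is", "are", "am"] : List String) then some 2
       else if s ∈ (["a", "an"] : List String) then some 3
       else none) := by
  unfold wordClassB
  simp only [PySem.Dict.get?_mk_cons, List.mem_cons, beq_iff_eq]
  split_ifs <;> first | rfl | simp_all [eq_comm]

-- range of the word-class dictionary's values
lemma wc_range (s : String) :
    wordClassB.get? s = none ∨ wordClassB.get? s = some 0 ∨ wordClassB.get? s = some 1 ∨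
      wordClassB.get? s = some 2 ∨ wordClassB.get? s = some 3 := by
  rw [wordClassB_spec]; split_ifs <;> simp

-- each word class is exactly one of A's membership conditions
lemma wc_eq0 (s : String) : wordClassB.get? s = some 0 ↔ s = "i" := by
  rw [wordClassB_spec]; split_ifs with h1 h2 h3 h4
  · exact iff_of_true rfl h1
  · exact iff_of_false (by simp) (fun hs => by subst hs; revert h2; decide)
  · exact iff_of_false (by simp) (fun hs => by subst hs; revert h3; decide)
  · exact iff_of_false (by simp) (fun hs => by subst hs; revert h4; decide)
  · exact iff_of_false (by simp) h1

lemma wc_eq1 (s : String) : wordClassB.get? s = some 1 ↔ s ∈ (["its", "it's", "thats", "that's"] : List String) := by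
  rw [wordClassB_spec]; split_ifs with h1 h2 h3 h4
  · exact iff_of_false (by simp) (fun hs => by subst h1; revert hs; decide)
  · exact iff_of_true rfl h2
  · exact iff_of_false (by simp) (fun hs => by simp only [List.mem_cons, List.not_mem_nil, or_false] at hs; rcases hs with rfl | rfl | rfl | rfl <;> revert h3 <;> decide)
  · exact iff_of_false (by simp) (fun hs => by simp only [List.mem_cons, List.not_mem_nil, or_false] at hs; rcases hs with rfl | rfl | rfl | rfl <;> revert h4 <;> decide)
  · exact iff_of_false (by simp) h2

lemma wc_eq2 (s : String) : wordClassB.get? s = some 2 ↔ s ∈ (["is", "are", "am"] : List String) := by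
  rw [wordClassB_spec]; split_ifs with h1 h2 h3 h4
  · exact iff_of_false (by simp) (fun hs => by subst h1; revert hs; decide)
  · exact iff_of_false (by simp) (fun hs => by simp only [List.mem_cons, List.not_mem_nil, or_false] at hs; rcases hs with rfl | rfl | rfl <;> revert h2 <;> decide)
  · exact iff_of_true rfl h3
  · exact iff_of_false (by simp) (fun hs => by simp only [List.mem_cons, List.not_mem_nil, or_false] at hs; rcases hs with rfl | rfl | rfl <;> revert h4 <;> decide)
  · exact iff_of_false (by simp) h3

lemma wc_eq3 (s : String) : wordClassB.get? s = some 3 ↔ s ∈ (["a", "an"] : List String) := by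
  rw [wordClassB_spec]; split_ifs with h1 h2 h3 h4
  · exact iff_of_false (by simp) (fun hs => by subst h1; revert hs; decide)
  · exact iff_of_false (by simp) (fun hs => by simp only [List.mem_cons, List.not_mem_nil, or_false] at hs; rcases hs with rfl | rfl <;> revert h2 <;> decide)
  · exact iff_of_false (by simp) (fun hs => by simp only [List.mem_cons, List.not_mem_nil, or_false] at hs; rcases hs with rfl | rfl <;> revert h3 <;> decide)
  · exact iff_of_true rfl h4
  · exact iff_of_false (by simp) h4

-- B's category equals the A-shaped first-match chain (under the skip guard)
set_option maxHeartbeats 4000000 in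
lemma categoryB_eq (orig corr : String) (h : ¬ (orig = "" ∧ corr = "")) :
    categoryB orig corr =
      (if PySem.Str.lower orig = "i" ∧ PySem.Str.lower corr = "i" then 0
       else if PySem.Str.lower orig ∈ (["its", "it's", "thats", "that's"] : List String) ∧ PySem.Str.lower corr ∈ (["its", "it's", "thats", "that's"] : List String) then 1
       else if PySem.Str.lower orig ∈ (["is", "are", "am"] : List String) ∧ PySem.Str.lower corr ∈ (["is", "are", "am"] : List String) then 2
       else if PySem.Str.lower orig ∈ (["a", "an"] : List String) ∧ PySem.Str.lower corr ∈ (["a", "an"] : List String) then 3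
       else if orig = "" ∧ corr ≠ "" then 4
       else if orig ≠ "" ∧ corr = "" then 5
       else 6) := by
  unfold categoryB
  simp only [← wc_eq0 (PySem.Str.lower orig), ← wc_eq0 (PySem.Str.lower corr),
      ← wc_eq1 (PySem.Str.lower orig), ← wc_eq1 (PySem.Str.lower corr),
      ← wc_eq2 (PySem.Str.lower orig), ← wc_eq2 (PySem.Str.lower corr),
      ← wc_eq3 (PySem.Str.lower orig), ← wc_eq3 (PySem.Str.lower corr)]
  rcases wc_range (PySem.Str.lower orig) with h1 | h1 | h1 | h1 | h1 <;>
    rcases wc_range (PySem.Str.lower corr) with h2 | h2 | h2 | h2 | h2 <;>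
    simp only [h1, h2] <;> (try simp) <;> (try split_ifs <;> simp_all)

-- per-error message: B's token rendering at category*3+level equals A's inline cascade
lemma msg_eq (difficulty orig corr : String) (h : ¬ (orig = "" ∧ corr = "")) :
    renderB orig corr (msgsB.getD (categoryB orig corr * 3 + levelB difficulty) []) =
      (if difficulty = "beginner" then
        (if PySem.Str.lower orig = "i" ∧ PySem.Str.lower corr = "i" then
          "'" ++ orig ++ "' should be '" ++ corr ++ "'. Always capitalize 'I'."
        else if PySem.Str.lower orig ∈ (["its", "it's", "thats", "that's"] : List String) ∧ PySem.Str.lower corr ∈ (["its", "it's", "thats", "that's"] : List String) then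
          "'" ++ orig ++ "' should be '" ++ corr ++ "'. Use 'it's' or 'that's' for 'it is'/'that is', 'its'/'thats' for possession."
        else if PySem.Str.lower orig ∈ (["is", "are", "am"] : List String) ∧ PySem.Str.lower corr ∈ (["is", "are", "am"] : List String) then
          "'" ++ orig ++ "' should be '" ++ corr ++ "'. The verb must match the subject."
        else if PySem.Str.lower orig ∈ (["a", "an"] : List String) ∧ PySem.Str.lower corr ∈ (["a", "an"] : List String) then
          "'" ++ orig ++ "' should be '" ++ corr ++ "'. Use 'an' before vowels."
        else if orig = "" ∧ corr ≠ "" then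
          "Add '" ++ corr ++ "' to your sentence."
        else if orig ≠ "" ∧ corr = "" then
          "You don’t need '" ++ orig ++ "'."
        else
          "Change '" ++ orig ++ "' to '" ++ corr ++ "'.")
      else if difficulty = "intermediate" then
        (if PySem.Str.lower orig = "i" ∧ PySem.Str.lower corr = "i" then
          "'" ++ orig ++ "' should be '" ++ corr ++ "'. Capitalize 'I'."
        else if PySem.Str.lower orig ∈ (["its", "it's", "thats", "that's"] : List String) ∧ PySem.Str.lower corr ∈ (["its", "it's", "thats", "that's"] : List String) then
          "'" ++ orig ++ "' should be '" ++ corr ++ "'. 'It's'/'That's' means 'it is'/'that is', 'its'/'thats' shows ownership."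
        else if PySem.Str.lower orig ∈ (["is", "are", "am"] : List String) ∧ PySem.Str.lower corr ∈ (["is", "are", "am"] : List String) then
          "'" ++ orig ++ "' should be '" ++ corr ++ "'. Ensure verb agreement."
        else if PySem.Str.lower orig ∈ (["a", "an"] : List String) ∧ PySem.Str.lower corr ∈ (["a", "an"] : List String) then
          "'" ++ orig ++ "' should be '" ++ corr ++ "'. Articles match sounds."
        else if orig = "" ∧ corr ≠ "" then
          "Add '" ++ corr ++ "' for correctness."
        else if orig ≠ "" ∧ corr = "" then
          "Remove '" ++ orig ++ "'."
        else
          "Use '" ++ corr ++ "' instead of '" ++ orig ++ "'.")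
      else
        (if PySem.Str.lower orig = "i" ∧ PySem.Str.lower corr = "i" then
          "'" ++ orig ++ "' should be '" ++ corr ++ "'. Pronoun 'I' needs capitalization."
        else if PySem.Str.lower orig ∈ (["its", "it's", "thats", "that's"] : List String) ∧ PySem.Str.lower corr ∈ (["its", "it's", "thats", "that's"] : List String) then
          "'" ++ orig ++ "' should be '" ++ corr ++ "'. Use 'it's'/'that's' for contraction, 'its'/'thats' for possessive."
        else if PySem.Str.lower orig ∈ (["is", "are", "am"] : List String) ∧ PySem.Str.lower corr ∈ (["is", "are", "am"] : List String) then
          "'" ++ orig ++ "' should be '" ++ corr ++ "'. Subject-verb agreement issue."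
        else if PySem.Str.lower orig ∈ (["a", "an"] : List String) ∧ PySem.Str.lower corr ∈ (["a", "an"] : List String) then
          "'" ++ orig ++ "' should be '" ++ corr ++ "'. Incorrect article."
        else if orig = "" ∧ corr ≠ "" then
          "Insert '" ++ corr ++ "' for structure."
        else if orig ≠ "" ∧ corr = "" then
          "'" ++ orig ++ "' is redundant."
        else
          "Replace '" ++ orig ++ "' with '" ++ corr ++ "'.")) := by
  rw [categoryB_eq orig corr h]
  by_cases hb : difficulty = "beginner"
  · subst hb
    have hl : levelB "beginner" = 0 := by decide
    rw [hl, if_pos rfl]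
    split_ifs <;> simp [renderB, msgsB, String.append_assoc]
  · by_cases hi : difficulty = "intermediate"
    · subst hi
      have hl : levelB "intermediate" = 1 := by decide
      rw [hl, if_neg hb, if_pos rfl]
      split_ifs <;> simp [renderB, msgsB, String.append_assoc]
    · have hl : levelB difficulty = 2 := by
        unfold levelB
        rw [PySem.Dict.getD_eq_get?_getD]
        simp [Ne.symm hb, Ne.symm hi, PySem.Dict.get?]
      rw [hl, if_neg hb, if_neg hi]
      split_ifs <;> simp [renderB, msgsB, String.append_assoc]

-- the two loops agree step by step
lemma loops_eq (difficulty : String) :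
    ∀ (diff : List (List (String × String))) (acc : List String),
      explainA_loop diff difficulty acc = explainB_loop diff (levelB difficulty) acc := by
  intro diff
  induction diff with
  | nil => intro acc; rfl
  | cons e rest ih =>
    intro acc
    rw [explainA_loop, explainB_loop]
    cases h1 : (PySem.Dict.mk e).get? "original" with
    | none => exact ih acc
    | some orig =>
      cases h2 : (PySem.Dict.mk e).get? "corrected" with
      | none => exact ih acc
      | some corr =>
        dsimp only
        by_cases hskip : orig = "" ∧ corr = ""
        · have : ¬ (orig ≠ "" ∨ corr ≠ "") := by tauto
          rw [if_pos hskip, if_neg this]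
          exact ih acc
        · have hkeep : orig ≠ "" ∨ corr ≠ "" := by tauto
          rw [if_neg hskip, if_pos hkeep]
          rw [msg_eq difficulty orig corr hskip]
          exact ih _

-- ===== VERDICT (by name: the statement is the Claim_ definition above) =====
theorem explain_mistake_spec : Claim_equal_explain_mistake := by
  intro diff difficulty _ _
  unfold Spec_explain_mistake explain_mistake explain_mistake_alt
  by_cases h : diff = []
  · simp [h]
  · rw [if_neg h, if_neg h, loops_eq]
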